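-- pv_equiv track=rewrite | github.com/ckoons/BubbleSpacetimeTheory | play/toy_268_first_blood_ifiat_betti.py | dpll_backtracks
-- ===== SOURCE A (Python) =====
-- def dpll_backtracks(n, clauses, max_bt=50000):
--     """DPLL backtrack count."""
--     backtracks = [0]
--
--     def propagate(assignment, cls):
--         changed = True
--         while changed:
--             changed = False
--             for clause in cls:
--                 sat = False
--                 unassigned = []
--                 for v, s in clause:
--                     if v in assignment:
--                         if assignment[v] == s:
--                             sat = True
--                             break
--                     else:
--                         unassigned.append((v, s))
--                 if sat:
--                     continue
--                 if len(unassigned) == 0: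
--                     return False
--                 if len(unassigned) == 1:
--                     v, s = unassigned[0]
--                     assignment[v] = s
--                     changed = True
--         return True
--
--     def solve(assignment, cls):
--         if backtracks[0] >= max_bt:
--             return None
--         a = dict(assignment)
--         if not propagate(a, cls):
--             backtracks[0] += 1
--             return None
--         unassigned = [v for v in range(n) if v not in a]
--         if not unassigned:
--             return a
--         v = unassigned[0]
--         for s in [True, False]:
--             a2 = dict(a)
--             a2[v] = s
--             result = solve(a2, cls)
--             if result is not None:
--                 return result
--         backtracks[0] += 1
--         return None
--
--     solve({}, clauses)
--     return backtracks[0]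
-- ===== SOURCE B (Python) =====
-- def dpll_backtracks(n, clauses, max_bt=50000):
--     """DPLL backtrack count, iterative: explicit DFS stack instead of recursion."""
--     backtracks = 0
--
--     def propagate(assignment, cls):
--         changed = True
--         while changed:
--             changed = False
--             for clause in cls:
--                 sat = False
--                 unassigned = []
--                 for v, s in clause:
--                     if v in assignment:
--                         if assignment[v] == s:
--                             sat = True
--                             break
--                     else:
--                         unassigned.append((v, s))
--                 if sat:
--                     continue
--                 if len(unassigned) == 0:
--                     return False
--                 if len(unassigned) == 1:
--                     v, s = unassigned[0]
--                     assignment[v] = s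
--                     changed = True
--         return True
--
--     # stack items: ("enter", assignment) = a node to expand;
--     # ("unwind", None) = both children of a node have failed -> count a backtrack
--     stack = [("enter", {})]
--     while stack:
--         kind, asg = stack.pop()
--         if kind == "unwind":
--             backtracks += 1
--             continue
--         if backtracks >= max_bt:
--             continue
--         a = dict(asg)
--         if not propagate(a, clauses):
--             backtracks += 1
--             continue
--         v = next((u for u in range(n) if u not in a), None)
--         if v is None:
--             break  # first solution found: stop, no further counting
--         aT = dict(a); aT[v] = True
--         aF = dict(a); aF[v] = False
--         stack.append(("unwind", None))
--         stack.append(("enter", aF))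
--         stack.append(("enter", aT))
--     return backtracks
-- ===== Notes on version B (the rewrite author's own statement) =====
-- stated objective: alternative
-- what changed: The recursive solve with a mutable shared backtrack counter is replaced by an iterative depth-first search over an explicit stack of enter/unwind frames threading the counter (no Python call stack), preserving every increment site, the True-before-False order, the first-solution break and the max_bt entry guard; propagate is kept unchanged.
import Mathlib
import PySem

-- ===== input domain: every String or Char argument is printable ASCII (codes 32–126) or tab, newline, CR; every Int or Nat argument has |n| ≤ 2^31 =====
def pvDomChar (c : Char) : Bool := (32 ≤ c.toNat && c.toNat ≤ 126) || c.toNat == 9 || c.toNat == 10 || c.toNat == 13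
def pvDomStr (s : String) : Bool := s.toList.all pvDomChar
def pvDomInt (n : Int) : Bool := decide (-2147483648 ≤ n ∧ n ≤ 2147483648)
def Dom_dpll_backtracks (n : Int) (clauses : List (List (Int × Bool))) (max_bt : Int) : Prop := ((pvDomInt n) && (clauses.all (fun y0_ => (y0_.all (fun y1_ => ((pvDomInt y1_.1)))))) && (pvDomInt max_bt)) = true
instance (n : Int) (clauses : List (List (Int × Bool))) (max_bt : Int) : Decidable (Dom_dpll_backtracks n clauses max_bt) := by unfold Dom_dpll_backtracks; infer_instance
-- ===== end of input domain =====

-- B replaces A's recursive solve (mutable shared counter) by an iterative DFS over an explicit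
-- stack of enter/unwind frames; the same backtrack count is proved. Objective: alternative structure.

-- ===== PORT A =====
-- helpers shared by both ports: Source B keeps `propagate` verbatim, so its port is shared.

-- inner `for v, s in clause` loop: returns (sat, unassigned) with Python's break semantics
def pvScan (a : PySem.Dict Int Bool) : List (Int × Bool) → List (Int × Bool) → Bool × List (Int × Bool)
  | [], un => (false, un)
  | (v, s) :: rest, un =>
    match PySem.Dict.get? a v with
    | some b => if b = s then (true, un) else pvScan a rest un
    | none => pvScan a rest (un ++ [(v, s)])

-- one `for clause in cls` pass of propagate; none = conflict (return False); Bool is `changed`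
def pvOnePass : List (List (Int × Bool)) → PySem.Dict Int Bool → Bool →
    Option (PySem.Dict Int Bool × Bool)
  | [], a, changed => some (a, changed)
  | c :: rest, a, changed =>
    match pvScan a c [] with
    | (true, _) => pvOnePass rest a changed
    | (false, []) => none
    | (false, [(v, s)]) => pvOnePass rest (a.insert v s) true
    | (false, _ :: _ :: _) => pvOnePass rest a changed

-- the `while changed` loop; the fuel only guards totality: each pass with changed=True inserts a
-- fresh key drawn from the clauses' variables, so at most (total literal count)+1 passes run
def pvPropLoop (cls : List (List (Int × Bool))) : Nat → PySem.Dict Int Bool →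
    Option (PySem.Dict Int Bool)
  | 0, a => some a
  | f + 1, a =>
    match pvOnePass cls a false with
    | none => none
    | some (a', changed) => if changed then pvPropLoop cls f a' else some a'

def pvPropagate (cls : List (List (Int × Bool))) (a : PySem.Dict Int Bool) :
    Option (PySem.Dict Int Bool) :=
  pvPropLoop cls ((cls.map List.length).sum + 2) a

-- [v for v in range(n) if v not in a]
def pvUnassigned (n : Int) (a : PySem.Dict Int Bool) : List Int :=
  (PySem.List.pyRange 0 n 1).filter (fun u => ! PySem.Dict.contains a u)

-- A's recursive solve, threading the mutable cell backtracks[0] as an Int state; the fuel only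
-- guards totality: each recursive call assigns a fresh variable of range(n), so depth ≤ n+1
def pvSolveA (n max_bt : Int) (cls : List (List (Int × Bool))) :
    Nat → PySem.Dict Int Bool → Int → Option (PySem.Dict Int Bool) × Int
  | 0, _, bt => (none, bt)
  | f + 1, asg, bt =>
    if bt ≥ max_bt then (none, bt)
    else
      match pvPropagate cls asg with
      | none => (none, bt + 1)
      | some a =>
        match pvUnassigned n a with
        | [] => (some a, bt)
        | v :: _ =>
          match pvSolveA n max_bt cls f (a.insert v true) bt with
          | (some r, bt') => (some r, bt')
          | (none, bt') =>
            match pvSolveA n max_bt cls f (a.insert v false) bt' with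
            | (some r, bt'') => (some r, bt'')
            | (none, bt'') => (none, bt'' + 1)

def dpll_backtracks (n : Int) (clauses : List (List (Int × Bool))) (max_bt : Int) : Int :=
  (pvSolveA n max_bt clauses (n.toNat + 1) PySem.Dict.empty 0).2

-- ===== PORT B =====
-- The next five lemmas are cited by pvRunB's decreasing_by (termination of the while loop):
-- propagate only ever adds keys, so the unassigned-variable count never grows and strictly
-- drops when a branch variable is assigned.

theorem pvOnePass_contains (u : Int) :
    ∀ (cls : List (List (Int × Bool))) (a : PySem.Dict Int Bool) (ch : Bool)
      (a' : PySem.Dict Int Bool) (ch' : Bool),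
      pvOnePass cls a ch = some (a', ch') →
      PySem.Dict.contains a u = true → PySem.Dict.contains a' u = true := by
  intro cls
  induction cls with
  | nil =>
    intro a ch a' ch' h hu
    simp only [pvOnePass, Option.some.injEq, Prod.mk.injEq] at h
    exact h.1 ▸ hu
  | cons c rest ih =>
    intro a ch a' ch' h hu
    rcases hsc : pvScan a c [] with ⟨sat, un⟩
    cases sat with
    | true =>
      simp only [pvOnePass, hsc] at h
      exact ih a ch a' ch' h hu
    | false =>
      match un, hsc with
      | [], hsc => simp [pvOnePass, hsc] at h
      | [(v, s)], hsc =>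
        simp only [pvOnePass, hsc] at h
        refine ih _ _ _ _ h ?_
        simp [PySem.Dict.contains_insert, hu]
      | (x :: y :: tl), hsc =>
        simp only [pvOnePass, hsc] at h
        exact ih a ch a' ch' h hu

theorem pvPropLoop_contains (cls : List (List (Int × Bool))) (u : Int) :
    ∀ (f : Nat) (a a' : PySem.Dict Int Bool),
      pvPropLoop cls f a = some a' →
      PySem.Dict.contains a u = true → PySem.Dict.contains a' u = true := by
  intro f
  induction f with
  | zero =>
    intro a a' h hu
    simp only [pvPropLoop, Option.some.injEq] at h
    exact h ▸ hu
  | succ f ih =>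
    intro a a' h hu
    simp only [pvPropLoop] at h
    cases hp : pvOnePass cls a false with
    | none => rw [hp] at h; exact absurd h (by simp)
    | some p =>
      obtain ⟨a1, changed⟩ := p
      rw [hp] at h
      have h1 : PySem.Dict.contains a1 u = true := pvOnePass_contains u cls a false a1 changed hp hu
      cases changed with
      | true => simp only [if_true] at h; exact ih a1 a' h h1
      | false => simp only [Bool.false_eq_true, if_false, Option.some.injEq] at h; exact h ▸ h1

theorem pvPropagate_contains {cls : List (List (Int × Bool))} {a a' : PySem.Dict Int Bool}
    (h : pvPropagate cls a = some a') (u : Int)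
    (hu : PySem.Dict.contains a u = true) : PySem.Dict.contains a' u = true :=
  pvPropLoop_contains cls u _ a a' h hu

theorem pvUnassigned_le (n : Int) {a a' : PySem.Dict Int Bool}
    (h : ∀ u, PySem.Dict.contains a u = true → PySem.Dict.contains a' u = true) :
    (pvUnassigned n a').length ≤ (pvUnassigned n a).length := by
  unfold pvUnassigned
  rw [← List.countP_eq_length_filter, ← List.countP_eq_length_filter]
  refine List.countP_mono_left (fun u _ hu => ?_)
  cases hca : PySem.Dict.contains a u with
  | false => simp
  | true => simp [h u hca] at hu

theorem pvUnassigned_insert_lt (n : Int) {a : PySem.Dict Int Bool} {v : Int} (s : Bool)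
    (hv : v ∈ pvUnassigned n a) :
    (pvUnassigned n (a.insert v s)).length < (pvUnassigned n a).length := by
  have h1 : pvUnassigned n (a.insert v s) = (pvUnassigned n a).filter (fun u => !(u == v)) := by
    unfold pvUnassigned
    rw [List.filter_filter]
    refine List.filter_congr (fun u _ => ?_)
    rw [PySem.Dict.contains_insert]
    cases hca : PySem.Dict.contains a u <;> cases he : (u == v) <;> simp
  rw [h1, List.length_filter_lt_length_iff_exists]
  exact ⟨v, hv, by simp⟩

-- weight of a stack frame, for the termination measure of the while loop
def pvWeight (n : Int) : Option (PySem.Dict Int Bool) → Nat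
  | none => 1
  | some asg => 3 ^ ((pvUnassigned n asg).length + 1)

-- Source B's while loop: stack item some asg = ("enter", asg), none = ("unwind", None)
def pvRunB (n max_bt : Int) (cls : List (List (Int × Bool))) :
    List (Option (PySem.Dict Int Bool)) → Int → Int
  | [], bt => bt
  | none :: rest, bt => pvRunB n max_bt cls rest (bt + 1)
  | some asg :: rest, bt =>
    if bt ≥ max_bt then pvRunB n max_bt cls rest bt
    else
      match hp : pvPropagate cls asg with
      | none => pvRunB n max_bt cls rest (bt + 1)
      | some a =>
        match hun : pvUnassigned n a with
        | [] => bt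
        | v :: _ =>
          pvRunB n max_bt cls
            (some (a.insert v true) :: some (a.insert v false) :: none :: rest) bt
termination_by st _ => (st.map (pvWeight n)).sum
decreasing_by
  · simp only [List.map_cons, List.sum_cons, pvWeight]; omega
  · simp only [List.map_cons, List.sum_cons, pvWeight]
    have h3 : 0 < 3 ^ ((pvUnassigned n asg).length + 1) := Nat.pow_pos (by norm_num)
    omega
  · simp only [List.map_cons, List.sum_cons, pvWeight]
    have h3 : 0 < 3 ^ ((pvUnassigned n asg).length + 1) := Nat.pow_pos (by norm_num)
    omega
  · have hma : (pvUnassigned n a).length ≤ (pvUnassigned n asg).length :=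
      pvUnassigned_le n (pvPropagate_contains hp)
    have hvmem : v ∈ pvUnassigned n a := by rw [hun]; simp
    have hT := pvUnassigned_insert_lt n true hvmem
    have hF := pvUnassigned_insert_lt n false hvmem
    simp only [List.map_cons, List.sum_cons, pvWeight]
    have eA : (3 : Nat) ^ ((pvUnassigned n asg).length + 1) =
        3 ^ (pvUnassigned n asg).length * 3 := pow_succ 3 _
    have bT : (3 : Nat) ^ ((pvUnassigned n (a.insert v true)).length + 1) ≤
        3 ^ (pvUnassigned n asg).length := Nat.pow_le_pow_right (by norm_num) (by omega)
    have bF : (3 : Nat) ^ ((pvUnassigned n (a.insert v false)).length + 1) ≤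
        3 ^ (pvUnassigned n asg).length := Nat.pow_le_pow_right (by norm_num) (by omega)
    have pos : 0 < (3 : Nat) ^ (pvUnassigned n asg).length := Nat.pow_pos (by norm_num)
    rw [eA]
    omega

def dpll_backtracks_alt (n : Int) (clauses : List (List (Int × Bool))) (max_bt : Int) : Int :=
  pvRunB n max_bt clauses [some PySem.Dict.empty] 0

-- ===== PRECONDITION & SPEC =====
-- no Pre_: both ports are total and agree on every input of the domain
def Spec_dpll_backtracks (n : Int) (clauses : List (List (Int × Bool))) (max_bt : Int) (out : Int) : Prop := out = dpll_backtracks_alt n clauses max_bt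
instance (n : Int) (clauses : List (List (Int × Bool))) (max_bt : Int) (out : Int) : Decidable (Spec_dpll_backtracks n clauses max_bt out) := by unfold Spec_dpll_backtracks; infer_instance

-- ===== CLAIM (what is proved, stated in full; the proofs are below) =====
def Claim_equal_dpll_backtracks : Prop := ∀ (n : Int) (clauses : List (List (Int × Bool))) (max_bt : Int), Dom_dpll_backtracks n clauses max_bt → Spec_dpll_backtracks n clauses max_bt (dpll_backtracks n clauses max_bt)

-- ===== LEMMAS AND PROOFS =====

theorem pvRunB_nil (n max_bt : Int) (cls : List (List (Int × Bool))) (bt : Int) :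
    pvRunB n max_bt cls [] bt = bt := by
  rw [pvRunB.eq_def]

theorem pvRunB_unwind (n max_bt : Int) (cls : List (List (Int × Bool)))
    (rest : List (Option (PySem.Dict Int Bool))) (bt : Int) :
    pvRunB n max_bt cls (none :: rest) bt = pvRunB n max_bt cls rest (bt + 1) := by
  rw [pvRunB.eq_def]

theorem pvRunB_enter_guard (n max_bt : Int) (cls : List (List (Int × Bool)))
    (asg : PySem.Dict Int Bool) (rest : List (Option (PySem.Dict Int Bool))) (bt : Int)
    (hbt : bt ≥ max_bt) :
    pvRunB n max_bt cls (some asg :: rest) bt = pvRunB n max_bt cls rest bt := by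
  rw [pvRunB.eq_def]
  simp only [if_pos hbt]

theorem pvRunB_enter_conflict (n max_bt : Int) (cls : List (List (Int × Bool)))
    (asg : PySem.Dict Int Bool) (rest : List (Option (PySem.Dict Int Bool))) (bt : Int)
    (hbt : ¬ bt ≥ max_bt) (hp : pvPropagate cls asg = none) :
    pvRunB n max_bt cls (some asg :: rest) bt = pvRunB n max_bt cls rest (bt + 1) := by
  rw [pvRunB.eq_def]
  simp only [if_neg hbt]
  split <;> simp_all

theorem pvRunB_enter_sol (n max_bt : Int) (cls : List (List (Int × Bool)))
    (asg a : PySem.Dict Int Bool) (rest : List (Option (PySem.Dict Int Bool))) (bt : Int)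
    (hbt : ¬ bt ≥ max_bt) (hp : pvPropagate cls asg = some a) (hun : pvUnassigned n a = []) :
    pvRunB n max_bt cls (some asg :: rest) bt = bt := by
  rw [pvRunB.eq_def]
  simp only [if_neg hbt]
  split
  · simp_all
  · split <;> simp_all

theorem pvRunB_enter_exp (n max_bt : Int) (cls : List (List (Int × Bool)))
    (asg a : PySem.Dict Int Bool) (rest : List (Option (PySem.Dict Int Bool))) (bt : Int)
    (v : Int) (vt : List Int)
    (hbt : ¬ bt ≥ max_bt) (hp : pvPropagate cls asg = some a)
    (hun : pvUnassigned n a = v :: vt) :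
    pvRunB n max_bt cls (some asg :: rest) bt =
      pvRunB n max_bt cls
        (some (a.insert v true) :: some (a.insert v false) :: none :: rest) bt := by
  rw [pvRunB.eq_def]
  simp only [if_neg hbt]
  split
  · simp_all
  · split <;> simp_all

-- simulation: running B's stack machine on an `enter asg` frame computes A's solve on asg and
-- then continues with the rest of the stack, provided the depth budget fA exceeds m(asg)
theorem pvSim (n max_bt : Int) (cls : List (List (Int × Bool))) :
    ∀ (fA : Nat) (asg : PySem.Dict Int Bool) (bt : Int)
      (rest : List (Option (PySem.Dict Int Bool))) (r : Int),
      (pvUnassigned n asg).length < fA →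
      (match pvSolveA n max_bt cls fA asg bt with
       | (some _, bt') => r = bt'
       | (none, bt') => pvRunB n max_bt cls rest bt' = r) →
      pvRunB n max_bt cls (some asg :: rest) bt = r := by
  intro fA
  induction fA with
  | zero => intro asg bt rest r hm _; exact absurd hm (Nat.not_lt_zero _)
  | succ fA ih =>
    intro asg bt rest r hm hcont
    by_cases hbt : bt ≥ max_bt
    · have hs : pvSolveA n max_bt cls (fA + 1) asg bt = (none, bt) := by
        simp [pvSolveA, hbt]
      simp only [hs] at hcont
      rw [pvRunB_enter_guard n max_bt cls asg rest bt hbt]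
      exact hcont
    · cases hp : pvPropagate cls asg with
      | none =>
        have hs : pvSolveA n max_bt cls (fA + 1) asg bt = (none, bt + 1) := by
          simp [pvSolveA, hbt, hp]
        simp only [hs] at hcont
        rw [pvRunB_enter_conflict n max_bt cls asg rest bt hbt hp]
        exact hcont
      | some a =>
        have hma : (pvUnassigned n a).length ≤ (pvUnassigned n asg).length :=
          pvUnassigned_le n (pvPropagate_contains hp)
        cases hun : pvUnassigned n a with
        | nil =>
          have hs : pvSolveA n max_bt cls (fA + 1) asg bt = (some a, bt) := by
            simp [pvSolveA, hbt, hp, hun]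
          simp only [hs] at hcont
          rw [pvRunB_enter_sol n max_bt cls asg a rest bt hbt hp hun]
          exact hcont.symm
        | cons v vt =>
          have hvmem : v ∈ pvUnassigned n a := by rw [hun]; simp
          have hmT : (pvUnassigned n (a.insert v true)).length < fA := by
            have := pvUnassigned_insert_lt n true hvmem; omega
          have hmF : (pvUnassigned n (a.insert v false)).length < fA := by
            have := pvUnassigned_insert_lt n false hvmem; omega
          rw [pvRunB_enter_exp n max_bt cls asg a rest bt v vt hbt hp hun]
          cases hT1 : pvSolveA n max_bt cls fA (a.insert v true) bt with
          | mk resT btT =>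
            cases resT with
            | some rT =>
              have hs : pvSolveA n max_bt cls (fA + 1) asg bt = (some rT, btT) := by
                simp [pvSolveA, hbt, hp, hun, hT1]
              simp only [hs] at hcont
              exact ih (a.insert v true) bt _ r hmT (by simp only [hT1]; exact hcont)
            | none =>
              cases hF1 : pvSolveA n max_bt cls fA (a.insert v false) btT with
              | mk resF btF =>
                have ihF : pvRunB n max_bt cls (some (a.insert v false) :: none :: rest) btT = r := by
                  refine ih (a.insert v false) btT _ r hmF ?_
                  simp only [hF1]
                  cases resF with
                  | some rF =>
                    have hs : pvSolveA n max_bt cls (fA + 1) asg bt = (some rF, btF) := by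
                      simp [pvSolveA, hbt, hp, hun, hT1, hF1]
                    simp only [hs] at hcont
                    exact hcont
                  | none =>
                    have hs : pvSolveA n max_bt cls (fA + 1) asg bt = (none, btF + 1) := by
                      simp [pvSolveA, hbt, hp, hun, hT1, hF1]
                    simp only [hs] at hcont
                    show pvRunB n max_bt cls (none :: rest) btF = r
                    rw [pvRunB_unwind]
                    exact hcont
                exact ih (a.insert v true) bt _ r hmT (by simp only [hT1]; exact ihF)

-- ===== VERDICT (by name: the statement is the Claim_ definition above) =====
theorem dpll_backtracks_spec : Claim_equal_dpll_backtracks := by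
  intro n clauses max_bt hdom
  unfold Spec_dpll_backtracks dpll_backtracks dpll_backtracks_alt
  have hm : (pvUnassigned n PySem.Dict.empty).length < n.toNat + 1 := by
    have hle : (pvUnassigned n PySem.Dict.empty).length ≤ (PySem.List.pyRange 0 n 1).length :=
      List.length_filter_le _ _
    rw [PySem.List.length_pyRange_one] at hle
    omega
  cases hs : pvSolveA n max_bt clauses (n.toNat + 1) PySem.Dict.empty 0 with
  | mk res bt' =>
    have hrun : pvRunB n max_bt clauses [some PySem.Dict.empty] 0 = bt' := by
      refine pvSim n max_bt clauses (n.toNat + 1) PySem.Dict.empty 0 [] bt' hm ?_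
      simp only [hs]
      cases res with
      | some rr => rfl
      | none => exact pvRunB_nil n max_bt clauses bt'
    rw [hrun]
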